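-- pv_equiv track=rewrite | github.com/AdamOtto/Daily-Challenges | Challenge1261.py | isPalindrom
-- ===== SOURCE A (Python) =====
-- def isPalindrom(in1, in2):
--     in3 = in1 + in2
--     in3Palin = True
--     low = 0
--     high = len(in3) - 1
--     while low <= high:
--         if in3[low] != in3[high]:
--             in3Palin = False
--             break
--         low += 1
--         high -= 1
--     return in3Palin
-- ===== SOURCE B (Python) =====
-- def isPalindrom(in1, in2):
--     s = in1 + in2
--     return s == s[::-1]
-- ===== Notes on version B (the rewrite author's own statement) =====
-- stated objective: idiomatic
-- what changed: Replaces the two-pointer inward index loop (with break flag) by materializing the reversed string and one bulk equality comparison, the idiomatic Python palindrome check.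
import Mathlib
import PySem

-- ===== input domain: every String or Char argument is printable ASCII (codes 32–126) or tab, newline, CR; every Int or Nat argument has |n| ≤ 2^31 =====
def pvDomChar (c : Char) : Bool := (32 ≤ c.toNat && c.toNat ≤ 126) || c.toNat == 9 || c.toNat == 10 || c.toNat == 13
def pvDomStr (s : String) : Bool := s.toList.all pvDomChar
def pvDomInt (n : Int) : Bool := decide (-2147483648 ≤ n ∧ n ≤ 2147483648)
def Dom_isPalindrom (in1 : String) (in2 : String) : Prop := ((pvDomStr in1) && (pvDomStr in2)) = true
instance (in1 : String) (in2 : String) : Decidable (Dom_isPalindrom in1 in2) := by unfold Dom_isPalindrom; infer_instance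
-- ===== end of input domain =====

-- B replaces A's two-pointer inward index loop by reversing the concatenation and one bulk equality comparison (idiomatic; same return value).

-- ===== PORT A =====
-- A's while-loop: walk low/high inward, break with False on a mismatch.
-- The `| _, _ => false` branch is unreachable for the in-range indices the loop produces (totality guard only).
def isPalindromLoop (cs : List Char) (low high : Int) : Bool :=
  if low ≤ high then
    match PySem.List.pyGet? cs low, PySem.List.pyGet? cs high with
    | some a, some b => if a ≠ b then false else isPalindromLoop cs (low + 1) (high - 1)
    | _, _ => false
  else true
termination_by (high + 1 - low).toNat
decreasing_by simp_wf; omega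

def isPalindrom (in1 : String) (in2 : String) : Bool :=
  let in3 := in1.toList ++ in2.toList      -- in3 = in1 + in2 (ported on the code-point list side)
  isPalindromLoop in3 0 ((in3.length : Int) - 1)

-- ===== PORT B =====
-- s == s[::-1]; s[::-1] is List.reverse (PySem.List.slice?_none_none_neg_one)
def isPalindrom_alt (in1 : String) (in2 : String) : Bool :=
  let s := in1.toList ++ in2.toList
  s == s.reverse

-- ===== PRECONDITION & SPEC =====
def Spec_isPalindrom (in1 : String) (in2 : String) (out : Bool) : Prop := out = isPalindrom_alt in1 in2
instance (in1 : String) (in2 : String) (out : Bool) : Decidable (Spec_isPalindrom in1 in2 out) := by unfold Spec_isPalindrom; infer_instance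

-- ===== CLAIM (what is proved, stated in full; the proofs are below) =====
def Claim_equal_isPalindrom : Prop := ∀ (in1 : String) (in2 : String), Dom_isPalindrom in1 in2 → Spec_isPalindrom in1 in2 (isPalindrom in1 in2)

-- ===== LEMMAS AND PROOFS =====

-- Boolean shape of reverse-compare on a segment a :: inner ++ [b].
lemma seg_beq_reverse (a b : Char) (inner : List Char) :
    ((a :: (inner ++ [b])) == (a :: (inner ++ [b])).reverse)
      = (a == b && (inner == inner.reverse)) := by
  by_cases hab : a = b
  · subst hab; simp [Bool.and_comm]
  · have h : (a == b) = false := beq_eq_false_iff_ne.mpr hab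
    simp [h]

-- The two-pointer loop on cs between low and high equals reverse-compare of the segment cs[low..high].
lemma isPalindromLoop_eq (n : Nat) : ∀ (cs : List Char) (low high : Int),
    0 ≤ low → high < (cs.length : Int) → (high + 1 - low).toNat = n →
    isPalindromLoop cs low high
      = (((cs.drop low.toNat).take n) == ((cs.drop low.toNat).take n).reverse) := by
  induction n using Nat.strong_induction_on with
  | _ n ih =>
    intro cs low high hlow hhigh hn
    rw [isPalindromLoop]
    by_cases hle : low ≤ high
    · have hlen : low < (cs.length : Int) := lt_of_le_of_lt hle hhigh
      have hga := PySem.List.pyGet?_eq_some_getElem (xs := cs) (i := low) hlow (by exact_mod_cast hlen)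
      have hgb := PySem.List.pyGet?_eq_some_getElem (xs := cs) (i := high) (le_trans hlow hle) (by exact_mod_cast hhigh)
      simp only [hle, if_true, hga, hgb]
      set a := cs[low.toNat]'(by omega) with ha
      set b := cs[high.toNat]'(by omega) with hb
      by_cases hcase : low = high
      · -- segment of length 1
        subst hcase
        have hn1 : n = 1 := by omega
        subst hn1
        have hseg : (cs.drop low.toNat).take 1 = [a] := by
          rw [List.take_one]
          simp [List.head?_drop, ha, List.getElem?_eq_getElem (show low.toNat < cs.length by omega)]
        rw [hseg]
        have hab : a = b := by rw [ha, hb]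
        simp [isPalindromLoop, show ¬ (low + 1 ≤ low - 1) by omega, hab]
      · -- low < high: the segment is a :: inner ++ [b]
        have hlh : low < high := lt_of_le_of_ne hle hcase
        have hn2 : 2 ≤ n := by omega
        have hseg : (cs.drop low.toNat).take n
            = a :: (((cs.drop (low + 1).toNat).take (n - 2)) ++ [b]) := by
          have hd : cs.drop low.toNat = a :: cs.drop (low.toNat + 1) := by
            rw [List.drop_eq_getElem_cons (show low.toNat < cs.length by omega)]
          rw [hd]
          have hn' : n = (n - 2) + 1 + 1 := by omega
          rw [hn', List.take_add_one]
          have hidx : (cs.drop (low.toNat + 1))[n - 2]? = some b := by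
            rw [List.getElem?_drop]
            have heq : low.toNat + 1 + (n - 2) = high.toNat := by omega
            rw [heq, List.getElem?_eq_getElem (show high.toNat < cs.length by omega)]
          have hlt : (low + 1).toNat = low.toNat + 1 := by omega
          simp [hidx, hlt]
        rw [hseg, seg_beq_reverse]
        by_cases hab : a = b
        · have hrec := ih (n - 2) (by omega) cs (low + 1) (high - 1) (by omega) (by omega) (by omega)
          simp [hab, hrec]
        · have h : (a == b) = false := beq_eq_false_iff_ne.mpr hab
          simp [hab, h]
    · have hn0 : n = 0 := by omega
      simp [hle, hn0]

-- ===== VERDICT (by name: the statement is the Claim_ definition above) =====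
theorem isPalindrom_spec : Claim_equal_isPalindrom := by
  intro in1 in2 _
  unfold Spec_isPalindrom isPalindrom isPalindrom_alt
  set cs := in1.toList ++ in2.toList with hc
  have h := isPalindromLoop_eq cs.length cs 0 ((cs.length : Int) - 1) (by omega) (by omega) (by omega)
  simpa using h
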